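-- pv_equiv track=rewrite | github.com/pawelprzegon/DUR-Raports | raporty_api/inputData.py | getPlexiData
-- ===== SOURCE A (Python) =====
-- def getPlexiData(data):
--     for each in data:
--         for key,value in each.items():
--             match key:
--                 case 'printed':
--                     printed = value
--                 case 'wrong':
--                     wrong = value
--                 case 'factor':
--                     factor = value
--     return printed, wrong, factor
-- ===== SOURCE B (Python) =====
-- def getPlexiData(data):
--     found = set()
--     for each in reversed(data):
--         for key in ('printed', 'wrong', 'factor'):
--             if key not in found and key in each:
--                 if key == 'printed':
--                     printed = each[key]
--                 elif key == 'wrong':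
--                     wrong = each[key]
--                 else:
--                     factor = each[key]
--                 found.add(key)
--         if len(found) == 3:
--             break
--     return printed, wrong, factor
-- ===== Notes on version B (the rewrite author's own statement) =====
-- stated objective: alternative
-- what changed: B scans the list of dicts in reverse, filling each of the three values only the first time its key appears and breaking out as soon as all three are captured, instead of A's forward scan that overwrites on every occurrence.
import Mathlib
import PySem

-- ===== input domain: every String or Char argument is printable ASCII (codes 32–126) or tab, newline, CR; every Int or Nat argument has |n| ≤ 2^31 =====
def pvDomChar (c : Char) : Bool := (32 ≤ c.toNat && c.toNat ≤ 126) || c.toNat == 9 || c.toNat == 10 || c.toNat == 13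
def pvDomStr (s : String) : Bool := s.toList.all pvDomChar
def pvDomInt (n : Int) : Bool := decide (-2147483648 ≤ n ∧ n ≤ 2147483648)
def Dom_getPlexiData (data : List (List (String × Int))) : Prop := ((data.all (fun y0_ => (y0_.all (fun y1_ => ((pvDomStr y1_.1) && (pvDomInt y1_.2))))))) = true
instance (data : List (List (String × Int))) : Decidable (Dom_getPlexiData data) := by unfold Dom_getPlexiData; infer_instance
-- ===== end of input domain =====

-- B replaces A's forward overwrite-on-every-occurrence scan by a reverse scan that keeps the
-- first value seen per key and breaks once all three are captured (objective: alternative).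


-- ===== PORT A =====
-- 'match key: case …' on one (key, value) pair, updating the matching slot
def aStep (s : Option Int × Option Int × Option Int) (kv : String × Int) :
    Option Int × Option Int × Option Int :=
  if kv.1 = "printed" then (some kv.2, s.2.1, s.2.2)
  else if kv.1 = "wrong" then (s.1, some kv.2, s.2.2)
  else if kv.1 = "factor" then (s.1, s.2.1, some kv.2)
  else s

def getPlexiData (data : List (List (String × Int))) : Int × Int × Int :=
  let s := data.foldl (fun s each => each.foldl aStep s) (none, none, none)
  -- Pre_ guarantees every slot is some; a none slot is Python's UnboundLocalError (excluded)
  (s.1.getD 0, s.2.1.getD 0, s.2.2.getD 0)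

-- ===== PORT B =====
-- "key in each … each[key]" : first-match dict lookup under the assoc-list convention
def dget (each : List (String × Int)) (k : String) : Option Int :=
  (PySem.Dict.mk each).get? k

def bLoop : List (List (String × Int)) → Option Int → Option Int → Option Int →
    Option Int × Option Int × Option Int
  | [], p, w, f => (p, w, f)
  | each :: rest, p, w, f =>
    -- "if key not in found and key in each": a slot already filled ('in found') is kept
    let p := if p.isSome then p else dget each "printed"
    let w := if w.isSome then w else dget each "wrong"
    let f := if f.isSome then f else dget each "factor"
    if p.isSome && w.isSome && f.isSome then (p, w, f)   -- len(found) == 3: break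
    else bLoop rest p w f

def getPlexiData_alt (data : List (List (String × Int))) : Int × Int × Int :=
  let s := bLoop data.reverse none none none
  -- unfilled slot = Python's UnboundLocalError (excluded by Pre_)
  (s.1.getD 0, s.2.1.getD 0, s.2.2.getD 0)

-- ===== PRECONDITION & SPEC =====
-- Pre_ excludes inputs on which A raises UnboundLocalError (one of the three keys never occurs),
-- and assoc lists repeating a key inside one inner list, which do not represent Python dicts.
def Pre_getPlexiData (data : List (List (String × Int))) : Prop :=
  (∀ each ∈ data, (each.map Prod.fst).Nodup) ∧
  "printed" ∈ data.flatten.map Prod.fst ∧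
  "wrong" ∈ data.flatten.map Prod.fst ∧
  "factor" ∈ data.flatten.map Prod.fst
instance (data : List (List (String × Int))) : Decidable (Pre_getPlexiData data) := by
  unfold Pre_getPlexiData; infer_instance

def pvWitness_getPlexiData : (List (List (String × Int))) :=
  [[("printed", 1), ("wrong", 2), ("factor", 3)]]

def Spec_getPlexiData (data : List (List (String × Int))) (out : Int × Int × Int) : Prop := out = getPlexiData_alt data
instance (data : List (List (String × Int))) (out : Int × Int × Int) : Decidable (Spec_getPlexiData data out) := by unfold Spec_getPlexiData; infer_instance

-- ===== CLAIM (what is proved, stated in full; the proofs are below) =====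
def Claim_equal_getPlexiData : Prop := ∀ (data : List (List (String × Int))), Dom_getPlexiData data → Pre_getPlexiData data → Spec_getPlexiData data (getPlexiData data)

-- ===== LEMMAS AND PROOFS =====

-- last-match lookup (what A's overwriting inner loop computes)
def mLast (k : String) : List (String × Int) → Option Int
  | [] => none
  | (k', v) :: t => Option.or (mLast k t) (if k' = k then some v else none)

-- first-match lookup, the list form of dget
def mFirst (k : String) : List (String × Int) → Option Int
  | [] => none
  | (k', v) :: t => if k' = k then some v else mFirst k t

-- first some value of m over a list of dicts
def fS (m : List (String × Int) → Option Int) : List (List (String × Int)) → Option Int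
  | [] => none
  | d :: t => Option.or (m d) (fS m t)

theorem dget_eq_mFirst (k : String) (each : List (String × Int)) :
    dget each k = mFirst k each := by
  induction each with
  | nil => rfl
  | cons kv t ih =>
    obtain ⟨k', v⟩ := kv
    rw [dget, PySem.Dict.get?_mk_cons, mFirst]
    by_cases h : k' = k
    · simp [h]
    · simp only [beq_iff_eq, h, if_false]
      exact ih

theorem mLast_eq_none (k : String) (t : List (String × Int))
    (h : k ∉ t.map Prod.fst) : mLast k t = none := by
  induction t with
  | nil => rfl
  | cons kv t ih =>
    obtain ⟨k', v⟩ := kv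
    simp only [List.map_cons, List.mem_cons, not_or] at h
    rw [mLast, ih h.2]
    simp [Ne.symm h.1]

theorem mLast_eq_mFirst (k : String) (each : List (String × Int))
    (h : (each.map Prod.fst).Nodup) : mLast k each = mFirst k each := by
  induction each with
  | nil => rfl
  | cons kv t ih =>
    obtain ⟨k', v⟩ := kv
    simp only [List.map_cons, List.nodup_cons] at h
    rw [mLast, mFirst]
    by_cases hk : k' = k
    · subst hk
      rw [mLast_eq_none k' t h.1]
      simp
    · simp [hk, ih h.2]

theorem fS_append (m : List (String × Int) → Option Int)
    (a b : List (List (String × Int))) :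
    fS m (a ++ b) = Option.or (fS m a) (fS m b) := by
  induction a with
  | nil => simp [fS]
  | cons d t ih => simp [fS, ih, Option.or_assoc]

theorem fS_congr (m1 m2 : List (String × Int) → Option Int)
    (l : List (List (String × Int))) (h : ∀ d ∈ l, m1 d = m2 d) :
    fS m1 l = fS m2 l := by
  induction l with
  | nil => rfl
  | cons d t ih =>
    rw [fS, fS, h d (by simp), ih (fun d hd => h d (by simp [hd]))]

-- A's inner loop, slot by slot
theorem foldl_aStep (each : List (String × Int)) (p w f : Option Int) :
    each.foldl aStep (p, w, f) =
      (Option.or (mLast "printed" each) p, Option.or (mLast "wrong" each) w,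
       Option.or (mLast "factor" each) f) := by
  induction each generalizing p w f with
  | nil => simp [mLast]
  | cons kv t ih =>
    obtain ⟨k, v⟩ := kv
    rw [List.foldl_cons]
    by_cases h1 : k = "printed"
    · rw [show aStep (p, w, f) (k, v) = (some v, w, f) by simp [aStep, h1], ih]
      simp [mLast, h1]
    · by_cases h2 : k = "wrong"
      · rw [show aStep (p, w, f) (k, v) = (p, some v, f) by simp [aStep, h2], ih]
        simp [mLast, h2]
      · by_cases h3 : k = "factor"
        · rw [show aStep (p, w, f) (k, v) = (p, w, some v) by simp [aStep, h3], ih]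
          simp [mLast, h3]
        · rw [show aStep (p, w, f) (k, v) = (p, w, f) by simp [aStep, h1, h2, h3], ih]
          simp [mLast, h1, h2, h3]

-- A's outer loop
theorem foldl_outer (data : List (List (String × Int))) (p w f : Option Int) :
    data.foldl (fun s each => each.foldl aStep s) (p, w, f) =
      (Option.or (fS (mLast "printed") data.reverse) p,
       Option.or (fS (mLast "wrong") data.reverse) w,
       Option.or (fS (mLast "factor") data.reverse) f) := by
  induction data generalizing p w f with
  | nil => simp [fS]
  | cons d t ih =>
    rw [List.foldl_cons, foldl_aStep, ih]
    simp only [List.reverse_cons, fS_append, fS, Option.or_none, Option.or_assoc]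

-- B's loop without the break
theorem bLoop_eq (l : List (List (String × Int))) (p w f : Option Int) :
    bLoop l p w f =
      (Option.or p (fS (fun d => dget d "printed") l),
       Option.or w (fS (fun d => dget d "wrong") l),
       Option.or f (fS (fun d => dget d "factor") l)) := by
  induction l generalizing p w f with
  | nil => simp [bLoop, fS]
  | cons d t ih =>
    rw [bLoop]
    have hp : (if p.isSome then p else dget d "printed") = Option.or p (dget d "printed") := by
      cases p <;> rfl
    have hw : (if w.isSome then w else dget d "wrong") = Option.or w (dget d "wrong") := by
      cases w <;> rfl
    have hf : (if f.isSome then f else dget d "factor") = Option.or f (dget d "factor") := by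
      cases f <;> rfl
    rw [hp, hw, hf]
    by_cases hb : ((Option.or p (dget d "printed")).isSome && (Option.or w (dget d "wrong")).isSome
        && (Option.or f (dget d "factor")).isSome) = true
    · rw [if_pos hb]
      simp only [Bool.and_eq_true, Option.isSome_iff_exists] at hb
      obtain ⟨⟨⟨vp, hvp⟩, ⟨vw, hvw⟩⟩, ⟨vf, hvf⟩⟩ := hb
      simp [fS, ← Option.or_assoc, hvp, hvw, hvf]
    · rw [if_neg hb, ih]
      simp [fS, Option.or_assoc]

theorem getPlexiData_eq_alt (data : List (List (String × Int)))
    (hnd : ∀ each ∈ data, (each.map Prod.fst).Nodup) :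
    getPlexiData data = getPlexiData_alt data := by
  rw [getPlexiData, getPlexiData_alt, foldl_outer, bLoop_eq]
  have hc : ∀ k, fS (mLast k) data.reverse = fS (fun d => dget d k) data.reverse := by
    intro k
    refine fS_congr _ _ _ (fun d hd => ?_)
    rw [mLast_eq_mFirst k d (hnd d (List.mem_reverse.mp hd)), dget_eq_mFirst]
  simp [hc]

-- ===== VERDICT (by name: the statement is the Claim_ definition above) =====
theorem getPlexiData_spec : Claim_equal_getPlexiData := by
  intro data _ hpre
  unfold Spec_getPlexiData
  exact getPlexiData_eq_alt data hpre.1
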